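-- pv_equiv track=rewrite | github.com/felanders/ETH-CS4NLP-22-Project-Linking-GND | candidate_generation.py | remove_obsolete_abbrevs
-- ===== SOURCE A (Python) =====
-- def remove_obsolete_abbrevs(fnames, abbr_firstname, prep_for_query=True):
--     """
--     Remove abbreviated firstnames, that are already covered by full firstnames.
--     e.g. fnames = ["R.", "Richard"] => fnames = ["Richard"]
--     """
--     cleaned_abbr_fnames = []
--     for abbr_group in abbr_firstname:  # this is now a list
--         cleaned_abbr_group = []
--         for abbr in abbr_group:
--             is_obsolete = False
--             abbr = abbr.rstrip(".")
--             for fname in fnames: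
--                 if fname.startswith(abbr):
--                     is_obsolete = True
--             if not is_obsolete:
--                 if prep_for_query:
--                     cleaned_abbr_group.append(abbr + "*")
--                 else:
--                     cleaned_abbr_group.append(abbr + ".")
--         cleaned_abbr_fnames.append(cleaned_abbr_group)
--
--     return cleaned_abbr_fnames
-- ===== SOURCE B (Python) =====
-- def remove_obsolete_abbrevs(fnames, abbr_firstname, prep_for_query=True):
--     """
--     Remove abbreviated firstnames that are already covered by full firstnames.
--     Builds the set of all prefixes of the full names once, so each abbreviation
--     is checked with a single set lookup instead of a scan over all full names.
--     """
--     covered = {f[:k] for f in fnames for k in range(len(f) + 1)}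
--     suffix = "*" if prep_for_query else "."
--     return [[base + suffix
--              for a in group
--              if (base := a.rstrip(".")) not in covered]
--             for group in abbr_firstname]
-- ===== Notes on version B (the rewrite author's own statement) =====
-- stated objective: faster
-- what changed: B precomputes the hash set of all prefixes of the full names once and replaces A's inner scan over all full names per abbreviation by a single set-membership lookup.
import Mathlib
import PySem

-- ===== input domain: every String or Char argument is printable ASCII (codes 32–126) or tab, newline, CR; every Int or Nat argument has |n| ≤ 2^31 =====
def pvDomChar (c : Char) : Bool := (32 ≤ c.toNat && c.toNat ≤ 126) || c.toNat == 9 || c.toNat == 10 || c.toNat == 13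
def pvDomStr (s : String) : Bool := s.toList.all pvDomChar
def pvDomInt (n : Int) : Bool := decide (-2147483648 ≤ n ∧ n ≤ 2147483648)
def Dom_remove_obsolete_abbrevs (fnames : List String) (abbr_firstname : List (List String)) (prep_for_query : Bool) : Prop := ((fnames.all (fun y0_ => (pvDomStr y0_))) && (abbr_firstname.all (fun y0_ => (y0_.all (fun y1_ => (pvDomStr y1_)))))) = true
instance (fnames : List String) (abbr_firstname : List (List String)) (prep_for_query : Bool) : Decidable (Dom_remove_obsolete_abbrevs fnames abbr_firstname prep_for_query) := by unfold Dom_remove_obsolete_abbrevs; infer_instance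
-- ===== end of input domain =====

-- B replaces A's inner scan of all full names per abbreviation by a set of all prefixes
-- of the full names built once, looked up per abbreviation (objective: faster).

-- exact port of Python's  s.rstrip(".")  : drop the trailing '.' characters (shared by both ports)
def pvRstripDot (cs : List Char) : List Char := (cs.reverse.dropWhile (fun c => c == '.')).reverse

-- ===== PORT A =====
def remove_obsolete_abbrevs (fnames : List String) (abbr_firstname : List (List String)) (prep_for_query : Bool) : List (List String) :=
  abbr_firstname.foldl (fun cleaned_abbr_fnames abbr_group =>
    let cleaned_abbr_group := abbr_group.foldl (fun cleaned_abbr_group abbr0 =>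
      let abbr := String.ofList (pvRstripDot abbr0.toList)
      let is_obsolete := fnames.foldl (fun is_obsolete fname =>
        if PySem.Str.startswith fname abbr then true else is_obsolete) false
      if !is_obsolete then
        (if prep_for_query then cleaned_abbr_group ++ [abbr ++ "*"]
         else cleaned_abbr_group ++ [abbr ++ "."])
      else cleaned_abbr_group) []
    cleaned_abbr_fnames ++ [cleaned_abbr_group]) []

-- ===== PORT B =====
-- the set  {f[:k] for f in fnames for k in range(len(f)+1)}
def pvCovered (fnames : List String) : PySem.Set String :=
  PySem.Set.ofList (fnames.flatMap (fun f =>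
    (PySem.List.pyRange 0 (PySem.Str.len f + 1)).map (fun k => PySem.Str.slice f none (some k))))

def remove_obsolete_abbrevs_alt (fnames : List String) (abbr_firstname : List (List String)) (prep_for_query : Bool) : List (List String) :=
  let covered := pvCovered fnames
  let suffix := if prep_for_query then "*" else "."
  abbr_firstname.map (fun group =>
    group.filterMap (fun a =>
      let base := String.ofList (pvRstripDot a.toList)
      if PySem.Set.contains covered base then none else some (base ++ suffix)))

-- ===== PRECONDITION & SPEC =====
def Spec_remove_obsolete_abbrevs (fnames : List String) (abbr_firstname : List (List String)) (prep_for_query : Bool) (out : List (List String)) : Prop := out = remove_obsolete_abbrevs_alt fnames abbr_firstname prep_for_query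
instance (fnames : List String) (abbr_firstname : List (List String)) (prep_for_query : Bool) (out : List (List String)) : Decidable (Spec_remove_obsolete_abbrevs fnames abbr_firstname prep_for_query out) := by unfold Spec_remove_obsolete_abbrevs; infer_instance

-- ===== CLAIM (what is proved, stated in full; the proofs are below) =====
def Claim_equal_remove_obsolete_abbrevs : Prop := ∀ (fnames : List String) (abbr_firstname : List (List String)) (prep_for_query : Bool), Dom_remove_obsolete_abbrevs fnames abbr_firstname prep_for_query → Spec_remove_obsolete_abbrevs fnames abbr_firstname prep_for_query (remove_obsolete_abbrevs fnames abbr_firstname prep_for_query)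

-- ===== LEMMAS AND PROOFS =====

-- s is among the slices f[:k], k = 0 … len(f), exactly when s is a prefix of f
lemma pv_mem_prefixes_iff (f s : String) :
    s ∈ (PySem.List.pyRange 0 (PySem.Str.len f + 1)).map (fun k => PySem.Str.slice f none (some k))
      ↔ s.toList <+: f.toList := by
  rw [List.mem_map]
  constructor
  · rintro ⟨k, hk, rfl⟩
    rw [PySem.List.mem_pyRange_one] at hk
    have hk0 : k = ((k.toNat : Nat) : Int) := by omega
    rw [← String.toList_inj.mpr rfl]
    have : (PySem.Str.slice f none (some k)).toList = f.toList.take k.toNat := by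
      rw [PySem.Str.toList_slice, PySem.Chars.slice_eq_listSlice, hk0,
        PySem.List.slice_to_natCast]
      simp only [List.take_eq_take_iff]
      omega
    rw [this]
    exact List.take_prefix _ _
  · intro h
    refine ⟨(s.toList.length : Int), ?_, ?_⟩
    · rw [PySem.List.mem_pyRange_one]
      have hle : s.toList.length ≤ f.toList.length := h.length_le
      have hlen : PySem.Str.len f = (f.toList.length : Int) := by
        simp [PySem.Str.len]
      constructor
      · positivity
      · rw [hlen]; omega
    · rw [← String.toList_inj]
      rw [PySem.Str.toList_slice, PySem.Chars.slice_eq_listSlice,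
        PySem.List.slice_to_natCast]
      exact (List.prefix_iff_eq_take.mp h).symm

-- A's inner scan ("some full name starts with s") agrees with B's prefix-set lookup
lemma pv_any_eq_contains (fnames : List String) (s : String) :
    fnames.any (fun f => PySem.Str.startswith f s)
      = PySem.Set.contains (pvCovered fnames) s := by
  rw [Bool.eq_iff_iff]
  rw [List.any_eq_true]
  unfold pvCovered
  simp only [PySem.Set.contains, List.contains_iff_mem, PySem.Set.mem_ofList,
    List.mem_flatMap]
  constructor
  · rintro ⟨f, hf, hs⟩
    rw [PySem.Str.startswith_eq, PySem.Chars.startswith_iff] at hs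
    exact ⟨f, hf, (pv_mem_prefixes_iff f s).mpr hs⟩
  · rintro ⟨f, hf, hs⟩
    refine ⟨f, hf, ?_⟩
    rw [PySem.Str.startswith_eq, PySem.Chars.startswith_iff]
    exact (pv_mem_prefixes_iff f s).mp hs

-- the two cleaned groups agree, for a fixed suffix sfx
lemma pv_group_eq (fnames : List String) (sfx : String) (g : List String) (acc : List String) :
    g.foldl (fun cg a =>
        if !(fnames.foldl (fun ob fname =>
              if PySem.Str.startswith fname (String.ofList (pvRstripDot a.toList)) then true else ob) false)
        then cg ++ [String.ofList (pvRstripDot a.toList) ++ sfx] else cg) acc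
      = acc ++ g.filterMap (fun a =>
          if PySem.Set.contains (pvCovered fnames) (String.ofList (pvRstripDot a.toList)) then none
          else some (String.ofList (pvRstripDot a.toList) ++ sfx)) := by
  induction g generalizing acc with
  | nil => simp
  | cons a t ih =>
    rw [List.foldl_cons, List.filterMap_cons, ih]
    rw [PySem.List.foldl_if_true_eq, Bool.false_or,
      pv_any_eq_contains fnames (String.ofList (pvRstripDot a.toList))]
    by_cases h : String.ofList (pvRstripDot a.toList) ∈ pvCovered fnames <;>
      simp [PySem.Set.contains, h]

-- ===== VERDICT (by name: the statement is the Claim_ definition above) =====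
theorem remove_obsolete_abbrevs_spec : Claim_equal_remove_obsolete_abbrevs := by
  intro fnames abbr_firstname prep_for_query _
  unfold Spec_remove_obsolete_abbrevs remove_obsolete_abbrevs remove_obsolete_abbrevs_alt
  cases prep_for_query <;>
  · simp only [Bool.false_eq_true, if_false, if_true, PySem.List.foldl_append_singleton_eq_map,
      List.nil_append]
    apply List.map_congr_left
    intro g _
    simpa using pv_group_eq fnames _ g []
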